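-- pv_equiv track=rewrite | github.com/pypi-data/pypi-mirror-236 | packages/SATO/SATO-0.1.3-py3-none-any.whl/SATO/validation.py | is_valid_fasta
-- ===== SOURCE A (Python) =====
-- def is_valid_fasta(file_content):
--     # No need to open a file here; we are working with content directly
--     lines = file_content.split('\n')
--     # Check if the content is empty
--     if not lines:
--         return False
--     # Initialize a flag to check for the start of a sequence
--     is_sequence = False
--     for line in lines:
--         line = line.strip()
--         # Skip empty lines
--         if not line:
--             continue
--         # Check for the header line (starts with ">")
--         if line.startswith(">"):
--             is_sequence = True
--         # Check for sequence data (any characters allowed)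
--         elif is_sequence:
--             continue
--         # If neither header nor sequence data, return False
--         else:
--             return False
--     return is_sequence  # True if at least one sequence found
-- ===== SOURCE B (Python) =====
-- def is_valid_fasta(file_content):
--     # A's verdict depends only on the first non-whitespace character of the
--     # whole content: '\n' and line-internal padding are all whitespace, so the
--     # first non-empty stripped line's first char is the first non-whitespace
--     # char overall, and A returns True iff it is '>'.
--     return file_content.strip().startswith(">")
-- ===== Notes on version B (the rewrite author's own statement) =====
-- stated objective: simpler
-- what changed: B replaces A's line-splitting scan with a never-cleared flag by a single expression: since '\n' and line padding are all whitespace, A's result is exactly whether the first non-whitespace character of the whole content is '>', i.e. file_content.strip().startswith('>').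
import Mathlib
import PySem

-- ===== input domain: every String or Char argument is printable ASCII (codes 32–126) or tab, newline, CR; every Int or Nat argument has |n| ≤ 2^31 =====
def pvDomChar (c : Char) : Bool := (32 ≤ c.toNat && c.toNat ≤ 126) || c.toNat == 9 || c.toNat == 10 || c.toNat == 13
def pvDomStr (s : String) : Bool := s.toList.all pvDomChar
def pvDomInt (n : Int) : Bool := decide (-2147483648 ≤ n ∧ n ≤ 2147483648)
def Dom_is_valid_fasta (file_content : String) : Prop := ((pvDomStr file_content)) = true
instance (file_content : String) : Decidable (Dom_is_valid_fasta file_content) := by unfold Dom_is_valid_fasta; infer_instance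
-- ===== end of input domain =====

-- B replaces A's line loop and never-cleared flag by a single expression:
-- strip the whole content and test whether it starts with '>' (simpler).

-- ===== PORT A =====
-- A's for-loop with the is_sequence flag and early 'return False'
def isValidFastaLoopA : List (List Char) → Bool → Bool
  | [], is_sequence => is_sequence
  | l :: rest, is_sequence =>
    let line := PySem.Chars.strip l
    if line = [] then isValidFastaLoopA rest is_sequence
    else if PySem.Chars.startswith line ['>'] then isValidFastaLoopA rest true
    else if is_sequence then isValidFastaLoopA rest is_sequence
    else false

def is_valid_fasta (file_content : String) : Bool :=
  let lines := PySem.Chars.splitOn file_content.toList ['\n']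
  if lines = [] then false
  else isValidFastaLoopA lines false

-- ===== PORT B =====
-- Source B: return file_content.strip().startswith(">")
def is_valid_fasta_alt (file_content : String) : Bool :=
  PySem.Chars.startswith (PySem.Chars.strip file_content.toList) ['>']

-- ===== PRECONDITION & SPEC =====
def Spec_is_valid_fasta (file_content : String) (out : Bool) : Prop := out = is_valid_fasta_alt file_content
instance (file_content : String) (out : Bool) : Decidable (Spec_is_valid_fasta file_content out) := by unfold Spec_is_valid_fasta; infer_instance

-- ===== CLAIM (what is proved, stated in full; the proofs are below) =====
def Claim_equal_is_valid_fasta : Prop := ∀ (file_content : String), Dom_is_valid_fasta file_content → Spec_is_valid_fasta file_content (is_valid_fasta file_content)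

-- ===== LEMMAS AND PROOFS =====

-- A simple structural recursion computing split on '\n'.
def splitNL : List Char → List (List Char)
  | [] => [[]]
  | c :: rest =>
    if c = '\n' then [] :: splitNL rest
    else
      match splitNL rest with
      | h :: t => (c :: h) :: t
      | [] => [[c]]

theorem splitNL_ne_nil (cs : List Char) : splitNL cs ≠ [] := by
  cases cs with
  | nil => simp [splitNL]
  | cons c rest =>
    simp only [splitNL]
    split_ifs
    · simp
    · cases h : splitNL rest <;> simp

-- prepend p onto the head of a list of lists
def headPrepend (p : List Char) : List (List Char) → List (List Char)
  | [] => [p]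
  | h :: t => (p ++ h) :: t

theorem splitOn_go_eq (fuel : Nat) (l cur : List Char) (acc : List (List Char))
    (h : l.length < fuel) :
    PySem.Chars.splitOn.go ['\n'] fuel l cur acc
      = acc.reverse ++ headPrepend cur.reverse (splitNL l) := by
  induction fuel generalizing l cur acc with
  | zero => omega
  | succ fuel ih =>
    cases l with
    | nil =>
      simp [PySem.Chars.splitOn.go, splitNL, headPrepend]
    | cons c rest =>
      by_cases hc : c = '\n'
      · subst hc
        have hpre : List.isPrefixOf ['\n'] ('\n' :: rest) = true := by
          simp [List.isPrefixOf]
        simp only [PySem.Chars.splitOn.go, hpre, if_pos]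
        rw [show List.drop (List.length ['\n']) ('\n' :: rest) = rest by simp]
        rw [ih rest [] (cur.reverse :: acc) (by simp at h; omega)]
        simp only [splitNL, if_true]
        cases hs : splitNL rest with
        | nil => exact absurd hs (splitNL_ne_nil rest)
        | cons h0 t0 => simp [headPrepend]
      · have hpre : List.isPrefixOf ['\n'] (c :: rest) = false := by
          simp [List.isPrefixOf]
          intro hcontr; exact hc hcontr.symm
        simp only [PySem.Chars.splitOn.go, hpre]
        rw [if_neg (by simp)]
        rw [ih rest (c :: cur) acc (by simp at h; omega)]
        simp only [splitNL, if_neg hc]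
        cases hs : splitNL rest with
        | nil => exact absurd hs (splitNL_ne_nil rest)
        | cons h0 t0 => simp [headPrepend]

theorem splitOn_eq_splitNL (cs : List Char) :
    PySem.Chars.splitOn cs ['\n'] = splitNL cs := by
  unfold PySem.Chars.splitOn
  rw [splitOn_go_eq cs.length.succ cs [] [] (Nat.lt_succ_self _)]
  cases hs : splitNL cs with
  | nil => exact absurd hs (splitNL_ne_nil cs)
  | cons h t => simp [headPrepend]

-- stripping ignores a leading whitespace char
theorem strip_cons_space {c : Char} (hc : PySem.Chars.isspace c = true) (h : List Char) :
    PySem.Chars.strip (c :: h) = PySem.Chars.strip h := by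
  simp [PySem.Chars.strip, PySem.Chars.lstrip, hc]

-- rstrip keeps a non-space head
theorem rstrip_cons_nonspace {c : Char} (hc : PySem.Chars.isspace c = false) (h : List Char) :
    PySem.Chars.rstrip (c :: h) = c :: PySem.Chars.rstrip h := by
  simp only [PySem.Chars.rstrip, List.reverse_cons]
  have : List.dropWhile PySem.Chars.isspace (h.reverse ++ [c])
      = List.dropWhile PySem.Chars.isspace h.reverse ++ [c] := by
    induction h.reverse with
    | nil => simp [hc]
    | cons x xs ihx =>
      by_cases hx : PySem.Chars.isspace x = true
      · simp [hx, ihx]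
      · simp only [Bool.not_eq_true] at hx
        simp [hx]
  rw [this]
  simp

theorem strip_cons_nonspace {c : Char} (hc : PySem.Chars.isspace c = false) (h : List Char) :
    PySem.Chars.strip (c :: h) = c :: PySem.Chars.rstrip h := by
  simp [PySem.Chars.strip, PySem.Chars.lstrip, hc, rstrip_cons_nonspace hc]

-- a line with empty strip is skipped by A's loop
theorem loopA_strip_nil {l : List Char} (hl : PySem.Chars.strip l = []) (t : List (List Char)) (b : Bool) :
    isValidFastaLoopA (l :: t) b = isValidFastaLoopA t b := by
  simp [isValidFastaLoopA, hl]

-- once the flag is true, A's loop returns true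
theorem loopA_true (ls : List (List Char)) : isValidFastaLoopA ls true = true := by
  induction ls with
  | nil => rfl
  | cons l rest ih =>
    simp only [isValidFastaLoopA]
    split_ifs <;> exact ih

-- '\n' is whitespace
theorem isspace_newline : PySem.Chars.isspace '\n' = true := by decide

-- the key lemma: A's loop over the split lines computes B's expression
theorem loopA_splitNL (cs : List Char) :
    isValidFastaLoopA (splitNL cs) false
      = PySem.Chars.startswith (PySem.Chars.strip cs) ['>'] := by
  induction cs with
  | nil =>
    simp [splitNL, isValidFastaLoopA, PySem.Chars.strip, PySem.Chars.lstrip,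
      PySem.Chars.rstrip, PySem.Chars.startswith]
  | cons c rest ih =>
    by_cases hc : PySem.Chars.isspace c = true
    · -- leading whitespace (including '\n' itself) is skipped by both sides
      rw [strip_cons_space hc rest, ← ih]
      by_cases hnl : c = '\n'
      · subst hnl
        simp only [splitNL, if_true]
        exact loopA_strip_nil rfl _ _
      · simp only [splitNL, if_neg hnl]
        cases hs : splitNL rest with
        | nil => exact absurd hs (splitNL_ne_nil rest)
        | cons h0 t0 =>
          simp only [isValidFastaLoopA, strip_cons_space hc h0]
    · -- first non-space char decides
      simp only [Bool.not_eq_true] at hc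
      have hnl : c ≠ '\n' := by
        intro hcontr; rw [hcontr] at hc
        exact absurd hc (by simp [isspace_newline])
      simp only [splitNL, if_neg hnl]
      cases hs : splitNL rest with
      | nil => exact absurd hs (splitNL_ne_nil rest)
      | cons h0 t0 =>
        simp only [isValidFastaLoopA, strip_cons_nonspace hc h0,
          strip_cons_nonspace hc rest]
        by_cases hgt : c = '>'
        · subst hgt
          simp [PySem.Chars.startswith, List.isPrefixOf, loopA_true]
        · have : ('>' == c) = false := by
            simp [BEq.beq]; intro hcontr; exact hgt hcontr.symm
          simp [PySem.Chars.startswith, List.isPrefixOf, this]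

-- ===== VERDICT (by name: the statement is the Claim_ definition above) =====
theorem is_valid_fasta_spec : Claim_equal_is_valid_fasta := by
  intro s _
  unfold Spec_is_valid_fasta is_valid_fasta is_valid_fasta_alt
  rw [splitOn_eq_splitNL]
  simp only [if_neg (splitNL_ne_nil s.toList)]
  exact loopA_splitNL s.toList
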